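-- pv_equiv track=rewrite | github.com/dkeriazisStuy/Bourbon-Chocolate_Blog | util/posts.py | render_post
-- ===== SOURCE A (Python) =====
-- def render_post(content):
--     replacements = (
--         ('&', '&amp;'),
--         ('<', '&lt;'),
--         ('>', '&gt;'),
--         ('\n', '<br>'),
--     )
--     for key, val in replacements:
--         content = content.replace(key, val)
--     return content
-- ===== SOURCE B (Python) =====
-- def render_post(content):
--     table = {'&': '&amp;', '<': '&lt;', '>': '&gt;', '\n': '<br>'}
--     return ''.join(table.get(c, c) for c in content)
-- ===== Notes on version B (the rewrite author's own statement) =====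
-- stated objective: simpler
-- what changed: Replaces four sequential full-string .replace passes with a single pass over the characters using an escape table and one join; correct because no replacement output re-introduces a source character matched by a later pass.
import Mathlib
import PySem

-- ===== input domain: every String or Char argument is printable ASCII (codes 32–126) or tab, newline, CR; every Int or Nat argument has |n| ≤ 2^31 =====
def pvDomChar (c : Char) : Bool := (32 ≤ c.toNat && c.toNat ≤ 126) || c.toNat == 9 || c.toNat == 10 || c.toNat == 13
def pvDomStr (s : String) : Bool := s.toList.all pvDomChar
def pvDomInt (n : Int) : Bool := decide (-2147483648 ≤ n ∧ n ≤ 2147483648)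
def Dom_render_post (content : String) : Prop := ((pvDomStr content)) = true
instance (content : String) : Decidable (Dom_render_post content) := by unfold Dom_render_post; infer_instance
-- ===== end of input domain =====

-- B replaces A's four sequential full-string .replace passes by a single pass over the
-- characters through an escape table joined once; same return value for every input.

-- ===== PORT A =====
def render_post (content : String) : String :=
  let content := PySem.Str.replace content "&" "&amp;"
  let content := PySem.Str.replace content "<" "&lt;"
  let content := PySem.Str.replace content ">" "&gt;"
  let content := PySem.Str.replace content "\n" "<br>"
  content

-- ===== PORT B =====
def renderTable : PySem.Dict Char String :=
  PySem.Dict.ofList [('&', "&amp;"), ('<', "&lt;"), ('>', "&gt;"), ('\n', "<br>")]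

def render_post_alt (content : String) : String :=
  PySem.Str.join "" (content.toList.map (fun c => PySem.Dict.getD renderTable c (String.ofList [c])))

-- ===== PRECONDITION & SPEC =====
def Spec_render_post (content : String) (out : String) : Prop := out = render_post_alt content
instance (content : String) (out : String) : Decidable (Spec_render_post content out) := by unfold Spec_render_post; infer_instance

-- ===== CLAIM (what is proved, stated in full; the proofs are below) =====
def Claim_equal_render_post : Prop := ∀ (content : String), Dom_render_post content → Spec_render_post content (render_post content)

-- ===== LEMMAS AND PROOFS =====

-- single-character replacement is a per-character flatMap
lemma replace_go_single (k : Char) (new : List Char) :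
    ∀ (s : List Char) (fuel : Nat) (acc : List Char), s.length ≤ fuel →
      PySem.Chars.replace.go [k] new fuel s acc
        = acc.reverse ++ s.flatMap (fun c => if c = k then new else [c]) := by
  intro s
  induction s with
  | nil =>
    intro fuel acc _
    cases fuel <;> simp [PySem.Chars.replace.go]
  | cons c t ih =>
    intro fuel acc h
    cases fuel with
    | zero => simp at h
    | succ f =>
      simp only [PySem.Chars.replace.go, List.isPrefixOf]
      by_cases hc : k = c
      · subst hc
        simp only [BEq.rfl, Bool.true_and, if_pos]
        simp only [List.length_cons, List.length_nil, Nat.zero_add, List.drop_succ_cons,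
          List.drop_zero]
        rw [ih f (new.reverse ++ acc) (by simpa using Nat.lt_succ_iff.mp (by simpa using h))]
        simp [List.flatMap_cons]
      · have hb : (k == c) = false := by simp [hc]
        simp only [hb, Bool.false_and, if_neg Bool.false_ne_true]
        rw [ih f (c :: acc) (by simpa using Nat.lt_succ_iff.mp (by simpa using h))]
        simp [List.flatMap_cons, (show c ≠ k from fun h' => hc (Eq.symm h'))]

lemma replace_single (k : Char) (new s : List Char) :
    PySem.Chars.replace s [k] new = s.flatMap (fun c => if c = k then new else [c]) := by
  rw [PySem.Chars.replace, if_neg (by simp)]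
  simpa using replace_go_single k new s s.length [] le_rfl

lemma intercalate_nil_sep (l : List (List Char)) : List.intercalate [] l = l.flatten := by
  induction l with
  | nil => simp [List.intercalate]
  | cons a t ih =>
    cases t with
    | nil => simp [List.intercalate]
    | cons b u =>
      simp only [List.intercalate, List.intersperse] at *
      simp_all

-- per-character agreement of the four passes with the table lookup
lemma char_case (c : Char) :
    (List.flatMap (fun c => if c = '\n' then "<br>".toList else [c])
      (List.flatMap (fun c => if c = '>' then "&gt;".toList else [c])
        (List.flatMap (fun c => if c = '<' then "&lt;".toList else [c])
          (if c = '&' then "&amp;".toList else [c]))))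
      = (PySem.Dict.getD renderTable c (String.ofList [c])).toList := by
  by_cases h1 : c = '&'
  · subst h1; decide
  by_cases h2 : c = '<'
  · subst h2; decide
  by_cases h3 : c = '>'
  · subst h3; decide
  by_cases h4 : c = '\n'
  · subst h4; decide
  · simp only [if_neg h1, List.flatMap_cons, List.flatMap_nil, if_neg h2, List.append_nil,
      if_neg h3, if_neg h4]
    have b1 : ('&' == c) = false := by simp [Ne.symm h1]
    have b2 : ('<' == c) = false := by simp [Ne.symm h2]
    have b3 : ('>' == c) = false := by simp [Ne.symm h3]
    have b4 : ('\n' == c) = false := by simp [Ne.symm h4]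
    simp [renderTable, PySem.Dict.getD, PySem.Dict.ofList, PySem.Dict.get?,
      PySem.Dict.insert, PySem.Dict.update, PySem.Dict.contains, PySem.Dict.empty,
      List.find?, b1, b2, b3, b4]

lemma chain_eq (L : List Char) :
    (List.flatMap (fun c => if c = '\n' then "<br>".toList else [c])
      (List.flatMap (fun c => if c = '>' then "&gt;".toList else [c])
        (List.flatMap (fun c => if c = '<' then "&lt;".toList else [c])
          (List.flatMap (fun c => if c = '&' then "&amp;".toList else [c]) L))))
      = L.flatMap (fun c => (PySem.Dict.getD renderTable c (String.ofList [c])).toList) := by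
  induction L with
  | nil => simp
  | cons c t ih =>
    simp only [List.flatMap_cons, List.flatMap_append]
    rw [ih, char_case]

-- ===== VERDICT (by name: the statement is the Claim_ definition above) =====
theorem render_post_spec : Claim_equal_render_post := by
  intro content _
  unfold Spec_render_post render_post render_post_alt
  rw [← String.toList_inj]
  simp only [PySem.Str.toList_replace, PySem.Str.toList_join]
  have e1 : "&".toList = ['&'] := rfl
  have e2 : "<".toList = ['<'] := rfl
  have e3 : ">".toList = ['>'] := rfl
  have e4 : "\n".toList = ['\n'] := rfl
  have e0 : "".toList = ([] : List Char) := rfl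
  rw [e1, e2, e3, e4, e0]
  rw [replace_single, replace_single, replace_single, replace_single]
  rw [PySem.Chars.join]
  simp only [List.map_map]
  rw [intercalate_nil_sep, List.flatten_eq_flatMap]
  rw [chain_eq]
  simp [List.flatMap_map]
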